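-- pv_equiv track=rewrite | github.com/tonyrla/AOC2022 | day01.py | sum_calories
-- ===== SOURCE A (Python) =====
-- def sum_calories(input: list[str]) -> list[int]:
--     lines = input
--     cals = 0
--     lunchbags = []
--     for line in lines:
--         try:
--             cals += int(line)
--         except ValueError:
--             lunchbags.append(cals)
--             cals = 0
--     return sorted(lunchbags, reverse=True)
-- ===== SOURCE B (Python) =====
-- def sum_calories(input: list[str]) -> list[int]:
--     def to_int(s):
--         try:
--             return int(s)
--         except ValueError:
--             return None
--     vals = [to_int(s) for s in input]
--     sums = []
--     start = 0
--     while True: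
--         try:
--             i = vals.index(None, start)
--         except ValueError:
--             break
--         sums.append(sum(v for v in vals[start:i] if v is not None))
--         start = i + 1
--     return sorted(sums, reverse=True)
-- ===== Notes on version B (the rewrite author's own statement) =====
-- stated objective: alternative
-- what changed: Replaces A's element-by-element running-accumulator loop by delimiter-index splitting: first map every line to Optional[int], then repeatedly locate the first None with index(), sum the slice before it and continue on the slice after it, finally sort descending.
import Mathlib
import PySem

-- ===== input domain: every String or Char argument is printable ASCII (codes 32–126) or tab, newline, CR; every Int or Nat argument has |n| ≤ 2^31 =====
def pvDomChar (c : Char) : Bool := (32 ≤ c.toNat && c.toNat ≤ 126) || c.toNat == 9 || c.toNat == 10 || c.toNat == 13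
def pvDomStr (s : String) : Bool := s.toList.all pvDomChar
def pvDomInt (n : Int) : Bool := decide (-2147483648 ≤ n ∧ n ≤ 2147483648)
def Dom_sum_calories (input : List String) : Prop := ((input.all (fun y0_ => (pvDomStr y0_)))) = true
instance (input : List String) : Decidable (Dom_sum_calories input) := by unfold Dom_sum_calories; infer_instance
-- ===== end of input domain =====

-- B replaces A's running-accumulator loop by mapping lines to Option Int and repeatedly
-- splitting at the first none via index?; equal results proved on Dom.
-- ===== PORT A =====
def sumCalLoop : List String → Int → List Int → List Int
  | [], _, lunchbags => lunchbags
  | line :: ls, cals, lunchbags =>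
    match PySem.Int.ofStr? line with
    | some n => sumCalLoop ls (cals + n) lunchbags
    | none => sumCalLoop ls 0 (lunchbags ++ [cals])

def sum_calories (input : List String) : List Int :=
  PySem.List.sorted (sumCalLoop input 0 []) (fun x => x) true

-- ===== PORT B =====
-- sum(v for v in t if v is not None)
def sumOpts (t : List (Option Int)) : Int :=
  t.foldl (fun a o => a + o.getD 0) 0

-- while True: try i = vals.index(None, start) except ValueError: break;
-- sums.append(sum of vals[start:i]); start = i + 1
-- (list.index(None, start) ported as index? on the drop-start suffix with offset;
--  vals[start:i] = (vals.drop start).take (i - start) by PySem.List.slice lemmas, i = start + j)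
def splitLoop (vals : List (Option Int)) (start : Nat) (sums : List Int) : List Int :=
  match h : PySem.List.index? (vals.drop start) none with
  | none => sums
  | some j => splitLoop vals (start + j + 1) (sums ++ [sumOpts ((vals.drop start).take j)])
termination_by vals.length - start
decreasing_by
  obtain ⟨hk, -, -⟩ := PySem.List.getElem_of_index?_eq_some h
  simp at hk
  omega

def sum_calories_alt (input : List String) : List Int :=
  PySem.List.sorted (splitLoop (input.map PySem.Int.ofStr?) 0 []) (fun x => x) true

-- ===== PRECONDITION & SPEC =====
def Spec_sum_calories (input : List String) (out : List Int) : Prop := out = sum_calories_alt input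
instance (input : List String) (out : List Int) : Decidable (Spec_sum_calories input out) := by unfold Spec_sum_calories; infer_instance

-- ===== CLAIM (what is proved, stated in full; the proofs are below) =====
def Claim_equal_sum_calories : Prop := ∀ (input : List String), Dom_sum_calories input → Spec_sum_calories input (sum_calories input)

-- ===== LEMMAS AND PROOFS =====
-- common characterisation: the chronological list of completed group sums
def specGroups : List (Option Int) → Int → List Int
  | [], _ => []
  | some n :: vs, acc => specGroups vs (acc + n)
  | none :: vs, acc => acc :: specGroups vs 0

theorem loop_eq_spec (ls : List String) (cals : Int) (bags : List Int) :
    sumCalLoop ls cals bags = bags ++ specGroups (ls.map PySem.Int.ofStr?) cals := by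
  induction ls generalizing cals bags with
  | nil => simp [sumCalLoop, specGroups]
  | cons line ls ih =>
    simp only [sumCalLoop, List.map_cons]
    cases PySem.Int.ofStr? line with
    | some n => simpa [specGroups] using ih (cals + n) bags
    | none => simp [specGroups, ih 0 (bags ++ [cals])]

theorem sumOpts_shift (t : List (Option Int)) (a : Int) :
    t.foldl (fun a o => a + o.getD 0) a = a + sumOpts t := by
  induction t generalizing a with
  | nil => simp [sumOpts]
  | cons o t ih =>
    rw [List.foldl_cons, ih]
    conv_rhs => rw [sumOpts, List.foldl_cons, ih]
    ring

theorem specGroups_no_none (vs : List (Option Int)) (a : Int) (h : none ∉ vs) :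
    specGroups vs a = [] := by
  induction vs generalizing a with
  | nil => rfl
  | cons o vs ih =>
    cases o with
    | none => simp at h
    | some n =>
      simp only [List.mem_cons, not_or] at h
      exact ih (a + n) h.2

theorem specGroups_split (t r : List (Option Int)) (a : Int) (ht : none ∉ t) :
    specGroups (t ++ none :: r) a = (a + sumOpts t) :: specGroups r 0 := by
  induction t generalizing a with
  | nil => simp [specGroups, sumOpts]
  | cons o t ih =>
    cases o with
    | none => simp at ht
    | some n =>
      simp only [List.mem_cons, not_or] at ht
      have hs : sumOpts (some n :: t) = n + sumOpts t := by
        rw [sumOpts, List.foldl_cons]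
        simpa using sumOpts_shift t n
      simp only [List.cons_append, specGroups]
      rw [ih (a + n) ht.2, hs, add_assoc]

theorem splitLoop_eq (n : ℕ) (vals : List (Option Int)) (start : Nat) (sums : List Int)
    (hn : vals.length - start ≤ n) :
    splitLoop vals start sums = sums ++ specGroups (vals.drop start) 0 := by
  induction n generalizing start sums with
  | zero =>
    have hd : vals.drop start = [] := by
      rw [List.drop_eq_nil_iff]
      omega
    rw [splitLoop, hd]
    simp [specGroups, PySem.List.index?_eq_idxOf?]
  | succ n ih =>
    rw [splitLoop]
    split
    next h =>
      have hnm : (none : Option Int) ∉ vals.drop start :=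
        (PySem.List.index?_eq_none_iff (vals.drop start) none).1 h
      simp [specGroups_no_none (vals.drop start) 0 hnm]
    next j h =>
      obtain ⟨pre, suf, hdecomp, hlen, hpre⟩ :=
        (PySem.List.index?_eq_some_iff (vals.drop start) none j).1 h
      have htake : (vals.drop start).take j = pre := by
        rw [hdecomp, ← hlen, List.take_left]
      have hdrop : vals.drop (start + j + 1) = suf := by
        have h1 : vals.drop (start + j + 1) = (vals.drop start).drop (j + 1) := by
          rw [List.drop_drop]
          ring_nf
        have hv : vals.drop start = (pre ++ [none]) ++ suf := by simp [hdecomp]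
        rw [h1, hv, List.drop_left']
        simp [hlen]
      have hlt : vals.length - (start + j + 1) ≤ n := by
        have h2 := congrArg List.length hdecomp
        simp at h2
        omega
      rw [htake, ih (start + j + 1) _ hlt, hdrop, hdecomp,
        specGroups_split pre suf 0 hpre]
      simp

-- ===== VERDICT (by name: the statement is the Claim_ definition above) =====
theorem sum_calories_spec : Claim_equal_sum_calories := by
  intro input _
  unfold Spec_sum_calories sum_calories sum_calories_alt
  rw [loop_eq_spec input 0 [], splitLoop_eq (input.map PySem.Int.ofStr?).length _ 0 [] (by omega)]
  simp
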